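-- pv_equiv track=rewrite | github.com/SamuelMR98/BYU_CPC | LucidProgrammingComp2024/ava.py | is_valid_ring
-- ===== SOURCE A (Python) =====
-- def is_valid_ring(arrangement, preferences):
--     n = len(arrangement)
--     for i in range(n):
--         left_neighbor = arrangement[i - 1]  # Previous country (circular)
--         right_neighbor = arrangement[(i + 1) % n]  # Next country (circular)
--         if left_neighbor not in preferences[arrangement[i]] or right_neighbor not in preferences[arrangement[i]]:
--             return False
--     return True
-- ===== SOURCE B (Python) =====
-- def is_valid_ring(arrangement, preferences):
--     allowed = {(x, v) for x in arrangement for v in preferences[x]}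
--     n = len(arrangement)
--     forward = {(arrangement[i - 1], arrangement[i]) for i in range(n)}
--     backward = {(b, a) for (a, b) in forward}
--     return forward <= allowed and backward <= allowed
-- ===== Notes on version B (the rewrite author's own statement) =====
-- stated objective: alternative
-- what changed: B replaces A's per-vertex loop that scans preference lists with early return by a staged set computation: it materializes the set of allowed directed edges of the arrangement's countries and the sets of required forward/backward ring edges, and answers by two subset tests.
-- outside the precondition, e.g. on is_valid_ring([1, 3, 4], {1: [3]}): A returns False, B raises KeyError
import Mathlib
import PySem

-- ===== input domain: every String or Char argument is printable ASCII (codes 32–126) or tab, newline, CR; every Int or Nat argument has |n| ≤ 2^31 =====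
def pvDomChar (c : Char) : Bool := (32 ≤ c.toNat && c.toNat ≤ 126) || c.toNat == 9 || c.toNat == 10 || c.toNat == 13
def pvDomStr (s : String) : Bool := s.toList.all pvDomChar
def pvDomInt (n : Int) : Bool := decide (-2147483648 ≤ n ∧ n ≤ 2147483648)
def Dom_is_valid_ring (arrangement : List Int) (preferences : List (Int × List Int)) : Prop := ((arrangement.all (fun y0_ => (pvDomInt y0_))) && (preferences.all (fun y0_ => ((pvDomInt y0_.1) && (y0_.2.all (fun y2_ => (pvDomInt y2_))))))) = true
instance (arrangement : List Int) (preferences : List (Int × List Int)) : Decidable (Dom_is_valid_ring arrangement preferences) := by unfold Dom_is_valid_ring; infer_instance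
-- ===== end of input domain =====

-- B replaces A's per-vertex loop that scans preference lists with early return by a staged set
-- computation: the allowed directed edges of the arrangement's countries and the required
-- forward/backward ring edges are materialized as sets, and the answer is two subset tests.

-- ===== PORT A =====
-- the for-loop with early 'return False'
def isValidRingLoopA (arrangement : List Int) (preferences : List (Int × List Int)) (n : Int) : List Int → Bool
  | [] => true
  | i :: rest =>
    let left_neighbor := PySem.List.pyGetD arrangement (i - 1) 0
    let right_neighbor := PySem.List.pyGetD arrangement (PySem.Int.mod (i + 1) n) 0
    let cur := PySem.List.pyGetD arrangement i 0
    let prefs := ((PySem.Dict.mk preferences).get? cur).getD []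
    if !(prefs.contains left_neighbor) || !(prefs.contains right_neighbor) then false
    else isValidRingLoopA arrangement preferences n rest

def is_valid_ring (arrangement : List Int) (preferences : List (Int × List Int)) : Bool :=
  let n : Int := arrangement.length
  isValidRingLoopA arrangement preferences n (PySem.List.pyRange 0 n 1)

-- ===== PORT B =====
def is_valid_ring_alt (arrangement : List Int) (preferences : List (Int × List Int)) : Bool :=
  let allowed : PySem.Set (Int × Int) :=
    PySem.Set.ofList (arrangement.flatMap
      (fun x => (((PySem.Dict.mk preferences).get? x).getD []).map (fun v => (x, v))))
  let n : Int := arrangement.length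
  let forward : PySem.Set (Int × Int) :=
    PySem.Set.ofList ((PySem.List.pyRange 0 n 1).map (fun i =>
      (PySem.List.pyGetD arrangement (i - 1) 0, PySem.List.pyGetD arrangement i 0)))
  let backward : PySem.Set (Int × Int) :=
    PySem.Set.ofList (forward.map (fun p => (p.2, p.1)))
  PySem.Set.issubset forward allowed && PySem.Set.issubset backward allowed

-- ===== PRECONDITION & SPEC =====
-- Pre_ excludes arrangements mentioning a country with no entry in preferences: on those both
-- programs can raise KeyError (A at the vertex whose scan first reaches the missing key, B while
-- collecting the countries' preference lists), and A may instead return False after an earlier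
-- violation, where B raises.
def Pre_is_valid_ring (arrangement : List Int) (preferences : List (Int × List Int)) : Prop :=
  ∀ x ∈ arrangement, x ∈ preferences.map Prod.fst

instance (arrangement : List Int) (preferences : List (Int × List Int)) : Decidable (Pre_is_valid_ring arrangement preferences) := by unfold Pre_is_valid_ring; infer_instance

def pvWitness_is_valid_ring : List Int × (List (Int × List Int)) := ([1, 2], [(1, [2, 1]), (2, [1])])

def Spec_is_valid_ring (arrangement : List Int) (preferences : List (Int × List Int)) (out : Bool) : Prop := out = is_valid_ring_alt arrangement preferences
instance (arrangement : List Int) (preferences : List (Int × List Int)) (out : Bool) : Decidable (Spec_is_valid_ring arrangement preferences out) := by unfold Spec_is_valid_ring; infer_instance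

-- ===== CLAIM (what is proved, stated in full; the proofs are below) =====
def Claim_equal_is_valid_ring : Prop := ∀ (arrangement : List Int) (preferences : List (Int × List Int)), Dom_is_valid_ring arrangement preferences → Pre_is_valid_ring arrangement preferences → Spec_is_valid_ring arrangement preferences (is_valid_ring arrangement preferences)

-- ===== LEMMAS AND PROOFS =====

-- shared abbreviations for the proofs
def pvElt (arrangement : List Int) (i : Nat) : Int := arrangement.getD i 0
-- left/right neighbor index of vertex i in a ring of size n
def pvL (n i : Nat) : Nat := if i = 0 then n - 1 else i - 1
def pvR (n i : Nat) : Nat := (i + 1) % n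
-- the allowed-directed-edge relation: b is in a's preference list
def pvE (preferences : List (Int × List Int)) (a b : Int) : Prop :=
  b ∈ ((PySem.Dict.mk preferences).get? a).getD []

theorem loopA_eq_all (arrangement : List Int) (preferences : List (Int × List Int)) (n : Int) (l : List Int) :
    isValidRingLoopA arrangement preferences n l
      = l.all (fun i =>
          (((PySem.Dict.mk preferences).get? (PySem.List.pyGetD arrangement i 0)).getD []).contains (PySem.List.pyGetD arrangement (i - 1) 0) &&
          (((PySem.Dict.mk preferences).get? (PySem.List.pyGetD arrangement i 0)).getD []).contains (PySem.List.pyGetD arrangement (PySem.Int.mod (i + 1) n) 0)) := by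
  induction l with
  | nil => rfl
  | cons i rest ih =>
    simp only [isValidRingLoopA, List.all_cons, ih]
    by_cases h1 : (((PySem.Dict.mk preferences).get? (PySem.List.pyGetD arrangement i 0)).getD []).contains (PySem.List.pyGetD arrangement (i - 1) 0) <;>
      by_cases h2 : (((PySem.Dict.mk preferences).get? (PySem.List.pyGetD arrangement i 0)).getD []).contains (PySem.List.pyGetD arrangement (PySem.Int.mod (i + 1) n) 0) <;>
        simp [*]

theorem pyGetD_left (arrangement : List Int) (i : Nat) (h0 : i < arrangement.length) :
    PySem.List.pyGetD arrangement ((i : Int) - 1) 0 = pvElt arrangement (pvL arrangement.length i) := by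
  rcases Nat.eq_zero_or_pos i with hi | hi
  · subst hi
    have hne : arrangement ≠ [] := by
      intro h; rw [h] at h0; simp at h0
    rw [show ((0:Nat) : Int) - 1 = -1 by norm_num, PySem.List.pyGetD_neg_one arrangement 0 hne]
    simp [pvElt, pvL, List.getLast_eq_getElem, List.getD_eq_getElem?_getD,
      List.getElem?_eq_getElem (by omega : arrangement.length - 1 < arrangement.length)]
  · rw [show ((i:Nat) : Int) - 1 = ((i - 1 : Nat) : Int) by omega]
    simp [pvElt, pvL, Nat.pos_iff_ne_zero.mp hi]

theorem pyGetD_right (arrangement : List Int) (i : Nat) :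
    PySem.List.pyGetD arrangement (PySem.Int.mod ((i : Int) + 1) (arrangement.length : Int)) 0
      = pvElt arrangement (pvR arrangement.length i) := by
  have hm : PySem.Int.mod ((i : Int) + 1) (arrangement.length : Int) = (((i + 1) % arrangement.length : Nat) : Int) := by
    rw [show ((i:Nat) : Int) + 1 = ((i + 1 : Nat) : Int) by omega]
    exact PySem.Int.mod_natCast _ _
  rw [hm, PySem.List.pyGetD_natCast]
  rfl

theorem pvL_pvR (n i : Nat) (h : i < n) : pvL n (pvR n i) = i := by
  unfold pvL pvR
  rcases Nat.lt_or_ge (i + 1) n with h1 | h1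
  · rw [Nat.mod_eq_of_lt h1]; simp
  · have h2 : i + 1 = n := by omega
    rw [h2, Nat.mod_self]; simp; omega

theorem pvR_pvL (n i : Nat) (h : i < n) : pvR n (pvL n i) = i := by
  unfold pvL pvR
  rcases Nat.eq_zero_or_pos i with h0 | h0
  · subst h0
    rw [if_pos rfl, Nat.sub_add_cancel (by omega), Nat.mod_self]
  · rw [if_neg (by omega), Nat.sub_add_cancel (by omega), Nat.mod_eq_of_lt h]

theorem pvR_lt (n i : Nat) (h : 0 < n) : pvR n i < n := Nat.mod_lt _ h

theorem pvL_lt (n i : Nat) (h : i < n) : pvL n i < n := by unfold pvL; split <;> omega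

-- A as a quantifier over vertex indices
theorem A_iff (arrangement : List Int) (preferences : List (Int × List Int)) :
    is_valid_ring arrangement preferences = true
      ↔ ∀ i < arrangement.length,
          pvE preferences (pvElt arrangement i) (pvElt arrangement (pvL arrangement.length i)) ∧
          pvE preferences (pvElt arrangement i) (pvElt arrangement (pvR arrangement.length i)) := by
  show isValidRingLoopA arrangement preferences _ _ = true ↔ _
  rw [loopA_eq_all, PySem.List.pyRange_zero_nat, List.all_map, List.all_eq_true]
  constructor
  · intro h i hi
    have := h i (List.mem_range.mpr hi)
    simp only [Function.comp_apply, Bool.and_eq_true, List.contains_eq_mem, decide_eq_true_eq,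
      PySem.List.pyGetD_natCast] at this
    rw [pyGetD_left arrangement i hi, pyGetD_right arrangement i] at this
    exact ⟨this.1, this.2⟩
  · intro h i hi
    rw [List.mem_range] at hi
    have := h i hi
    simp only [Function.comp_apply, Bool.and_eq_true, List.contains_eq_mem, decide_eq_true_eq,
      PySem.List.pyGetD_natCast]
    rw [pyGetD_left arrangement i hi, pyGetD_right arrangement i]
    exact ⟨this.1, this.2⟩

-- membership in B's allowed-edge set, collected from the arrangement's countries
theorem mem_allowed (arrangement : List Int) (preferences : List (Int × List Int)) (a b : Int) :
    (a, b) ∈ PySem.Set.ofList (arrangement.flatMap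
        (fun x => (((PySem.Dict.mk preferences).get? x).getD []).map (fun v => (x, v))))
      ↔ a ∈ arrangement ∧ pvE preferences a b := by
  rw [PySem.Set.mem_ofList, List.mem_flatMap]
  constructor
  · rintro ⟨x, hx, hmem⟩
    rw [List.mem_map] at hmem
    obtain ⟨v, hv, he⟩ := hmem
    rw [Prod.mk.injEq] at he
    exact ⟨he.1 ▸ hx, he.1 ▸ he.2 ▸ hv⟩
  · rintro ⟨ha, hb⟩
    exact ⟨a, ha, List.mem_map.mpr ⟨b, hb, rfl⟩⟩

theorem pvElt_mem (arrangement : List Int) (i : Nat) (h : i < arrangement.length) :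
    pvElt arrangement i ∈ arrangement := by
  unfold pvElt
  rw [List.getD_eq_getElem?_getD, List.getElem?_eq_getElem h]
  exact List.getElem_mem h

-- B as two quantifiers over vertex indices
theorem B_iff (arrangement : List Int) (preferences : List (Int × List Int)) :
    is_valid_ring_alt arrangement preferences = true
      ↔ ∀ i < arrangement.length,
          pvE preferences (pvElt arrangement (pvL arrangement.length i)) (pvElt arrangement i) ∧
          pvE preferences (pvElt arrangement i) (pvElt arrangement (pvL arrangement.length i)) := by
  unfold is_valid_ring_alt
  simp only [Bool.and_eq_true, PySem.Set.issubset_iff]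
  have hfwd : ∀ e, e ∈ PySem.Set.ofList ((PySem.List.pyRange 0 (arrangement.length : Int) 1).map (fun i =>
        (PySem.List.pyGetD arrangement (i - 1) 0, PySem.List.pyGetD arrangement i 0)))
      ↔ ∃ i < arrangement.length,
          e = (pvElt arrangement (pvL arrangement.length i), pvElt arrangement i) := by
    intro e
    rw [PySem.Set.mem_ofList, List.mem_map, PySem.List.pyRange_zero_nat]
    constructor
    · rintro ⟨j, hj, he⟩
      rw [List.mem_map] at hj
      obtain ⟨i, hi, hji⟩ := hj
      rw [List.mem_range] at hi
      refine ⟨i, hi, ?_⟩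
      rw [← he, ← hji, pyGetD_left arrangement i hi, PySem.List.pyGetD_natCast]
      rfl
    · rintro ⟨i, hi, he⟩
      refine ⟨(i : Int), List.mem_map.mpr ⟨i, List.mem_range.mpr hi, rfl⟩, ?_⟩
      rw [pyGetD_left arrangement i hi, PySem.List.pyGetD_natCast, he]
      rfl
  constructor
  · rintro ⟨h1, h2⟩ i hi
    constructor
    · have := h1 _ ((hfwd _).mpr ⟨i, hi, rfl⟩)
      exact ((mem_allowed arrangement preferences _ _).mp this).2
    · have hb : (pvElt arrangement i, pvElt arrangement (pvL arrangement.length i)) ∈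
          PySem.Set.ofList ((PySem.Set.ofList ((PySem.List.pyRange 0 (arrangement.length : Int) 1).map (fun i =>
            (PySem.List.pyGetD arrangement (i - 1) 0, PySem.List.pyGetD arrangement i 0)))).map (fun p => (p.2, p.1))) := by
        rw [PySem.Set.mem_ofList, List.mem_map]
        exact ⟨_, (hfwd _).mpr ⟨i, hi, rfl⟩, rfl⟩
      have := h2 _ hb
      exact ((mem_allowed arrangement preferences _ _).mp this).2
  · intro h
    constructor
    · intro e he
      obtain ⟨i, hi, he'⟩ := (hfwd e).mp he
      rw [he', mem_allowed arrangement preferences]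
      exact ⟨pvElt_mem arrangement _ (pvL_lt _ _ hi), (h i hi).1⟩
    · intro e he
      rw [PySem.Set.mem_ofList, List.mem_map] at he
      obtain ⟨p, hp, hpe⟩ := he
      obtain ⟨i, hi, hp'⟩ := (hfwd p).mp hp
      rw [← hpe, hp', mem_allowed arrangement preferences]
      exact ⟨pvElt_mem arrangement _ hi, (h i hi).2⟩

-- ===== VERDICT (by name: the statement is the Claim_ definition above) =====
theorem is_valid_ring_spec : Claim_equal_is_valid_ring := by
  intro arrangement preferences _ hpre
  unfold Spec_is_valid_ring
  rw [Bool.eq_iff_iff, A_iff, B_iff arrangement preferences]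
  constructor
  · intro hA i hi
    have hn : 0 < arrangement.length := by omega
    have h1 := hA (pvL arrangement.length i) (pvL_lt _ _ hi)
    have h2 := hA i hi
    rw [pvR_pvL _ _ hi] at h1
    exact ⟨h1.2, h2.1⟩
  · intro hB i hi
    have hn : 0 < arrangement.length := by omega
    have h1 := hB i hi
    have h2 := hB (pvR arrangement.length i) (pvR_lt _ _ hn)
    rw [pvL_pvR _ _ hi] at h2
    exact ⟨h1.2, h2.1⟩
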